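-- pv_equiv track=rewrite | github.com/rishabhmonga/practice | leet/offic_try/LetterTile.py | numTilePossibilities
-- ===== SOURCE A (Python) =====
-- import collections
-- import math
--
-- def numTilePossibilities(tiles: str) -> int:
--     freq = collections.Counter(tiles)
--     prod = 1
--     for f in freq.values():
--         prod *= f + 1
--     res = 0
--     for i in range(1, prod):
--         digits = []
--         for f in freq.values():
--             digits.append(i % (f + 1))
--             i = i // (f + 1)
--         tmp = math.factorial(sum(digits))
--         for d in digits:
--             tmp //= math.factorial(d)
--         res += tmp
--     return res
-- ===== SOURCE B (Python) =====
-- import collections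
-- import math
--
--
-- def numTilePossibilities(tiles: str) -> int:
--     # dp[n] = number of distinct sequences of length n using the letters processed so far
--     dp = [1]
--     for f in collections.Counter(tiles).values():
--         new = [0] * (len(dp) + f)
--         for n in range(len(new)):
--             s = 0
--             for j in range(min(f, n) + 1):
--                 if n - j < len(dp):
--                     s += math.comb(n, j) * dp[n - j]
--             new[n] = s
--         dp = new
--     return sum(dp) - 1
-- ===== Notes on version B (the rewrite author's own statement) =====
-- stated objective: faster
-- what changed: Replaces A's enumeration of all mixed-radix digit vectors (one multinomial, computed by factorial divisions, per vector - there are prod(f_i+1) of them) by a polynomial DP: for each distinct letter convolve dp with binomial coefficients (new[n] = sum_j C(n,j)*dp[n-j]), then sum dp and subtract 1.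
import Mathlib
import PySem

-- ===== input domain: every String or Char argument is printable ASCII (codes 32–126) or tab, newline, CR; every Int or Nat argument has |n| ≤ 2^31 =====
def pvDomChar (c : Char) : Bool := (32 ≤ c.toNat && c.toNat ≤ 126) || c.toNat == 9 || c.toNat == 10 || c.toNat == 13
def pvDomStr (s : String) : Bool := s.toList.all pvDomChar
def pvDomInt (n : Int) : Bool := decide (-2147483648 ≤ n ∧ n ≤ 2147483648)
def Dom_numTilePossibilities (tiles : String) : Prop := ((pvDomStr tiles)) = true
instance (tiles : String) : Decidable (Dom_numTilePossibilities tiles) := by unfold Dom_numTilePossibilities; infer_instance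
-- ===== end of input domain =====

-- B replaces A's enumeration of every mixed-radix digit vector (one multinomial each) by a
-- per-letter binomial-convolution DP over sequence lengths; a timing run measures the speed-up.

-- ===== PORT A =====
-- math.factorial n — exact for the nonnegative arguments it receives in this program
def pyFactorial (n : Int) : Int := (Nat.factorial n.toNat : Int)

-- body of A after `freq = Counter(tiles)`, as a function of freq.values()
def aMain (vals : List Int) : Int :=
  let prod := vals.foldl (fun p f => p * (f + 1)) 1
  (PySem.List.pyRange 1 prod 1).foldl (fun res i =>
    let st := vals.foldl
      (fun (st : List Int × Int) f =>
        (st.1 ++ [PySem.Int.mod st.2 (f + 1)], PySem.Int.floordiv st.2 (f + 1)))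
      (([] : List Int), i)
    let tmp := pyFactorial st.1.sum
    let tmp := st.1.foldl (fun t d => PySem.Int.floordiv t (pyFactorial d)) tmp
    res + tmp) 0

def numTilePossibilities (tiles : String) : Int :=
  aMain (PySem.Dict.counter tiles.toList).values

-- ===== PORT B =====
-- body of B after `Counter(tiles)`, as a function of the counter's values();
-- math.comb n j is Nat.choose n j (both arguments are nonnegative here)
def bMain (vals : List Int) : Int :=
  let dp := vals.foldl
    (fun (dp : List Int) f =>
      (List.range (dp.length + f.toNat)).map (fun n =>
        (List.range (min f.toNat n + 1)).foldl
          (fun s j => if n - j < dp.length then s + (n.choose j : Int) * dp.getD (n - j) 0 else s)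
          0))
    [1]
  dp.sum - 1

def numTilePossibilities_alt (tiles : String) : Int :=
  bMain (PySem.Dict.counter tiles.toList).values

-- ===== PRECONDITION & SPEC =====
def Spec_numTilePossibilities (tiles : String) (out : Int) : Prop := out = numTilePossibilities_alt tiles
instance (tiles : String) (out : Int) : Decidable (Spec_numTilePossibilities tiles out) := by unfold Spec_numTilePossibilities; infer_instance

-- ===== CLAIM (what is proved, stated in full; the proofs are below) =====
def Claim_equal_numTilePossibilities : Prop := ∀ (tiles : String), Dom_numTilePossibilities tiles → Spec_numTilePossibilities tiles (numTilePossibilities tiles)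

-- ===== LEMMAS AND PROOFS =====

-- all digit vectors v with v[k] ≤ fs[k] componentwise
def vecs : List Nat → List (List Nat)
  | [] => [[]]
  | f :: fs => (List.range (f + 1)).flatMap (fun j => (vecs fs).map (j :: ·))

-- the multinomial coefficient (v.sum)! / ∏ v[k]!, via the choose recursion
def mult : List Nat → Nat
  | [] => 1
  | j :: v => (j + v.sum).choose j * mult v

def prodFact (v : List Nat) : Nat := (v.map Nat.factorial).prod

-- mixed-radix digits of n in bases fs[k]+1, least significant first (A's decode loop)
def decodeN : List Nat → Nat → List Nat
  | [], _ => []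
  | f :: fs, n => n % (f + 1) :: decodeN fs (n / (f + 1))

def prodN : List Nat → Nat
  | [] => 1
  | f :: fs => (f + 1) * prodN fs

-- number of distinct sequences of length n over letters with multiplicities fs (B's dp entry)
def coeff : List Nat → Nat → Nat
  | [], n => if n = 0 then 1 else 0
  | f :: fs, n => ((List.range (min f n + 1)).map (fun j => n.choose j * coeff fs (n - j))).sum

-- the common value: total number of non-empty-or-empty sequences
def totalT (fs : List Nat) : Nat := ((vecs fs).map mult).sum

-- B's dp after processing gs
def reprB (gs : List Nat) : List Int :=
  (List.range (gs.sum + 1)).map (fun n => (coeff gs n : Nat))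


lemma lrange_sum (n : Nat) (f : Nat → Nat) :
    ((List.range n).map f).sum = ∑ i ∈ Finset.range n, f i := by
  exact (Nat.add_zero _).symm

lemma fact_eq (v : List Nat) : (v.sum).factorial = mult v * prodFact v := by
  induction v with
  | nil => simp [mult, prodFact]
  | cons j v ih =>
    have h : j ≤ j + v.sum := Nat.le_add_right _ _
    have := Nat.choose_mul_factorial_mul_factorial h
    simp only [List.sum_cons, mult, prodFact, List.map_cons, List.prod_cons]
    calc (j + v.sum).factorial
        = (j + v.sum).choose j * j.factorial * (j + v.sum - j).factorial := this.symm
      _ = (j + v.sum).choose j * j.factorial * (v.sum).factorial := by simp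
      _ = (j + v.sum).choose j * j.factorial * (mult v * prodFact v) := by rw [ih]
      _ = (j + v.sum).choose j * mult v * (j.factorial * (v.map Nat.factorial).prod) := by
            unfold prodFact; ring

lemma foldl_div_fact (v : List Nat) (K : Nat) :
    (v.map (Nat.cast : Nat → Int)).foldl
      (fun t d => PySem.Int.floordiv t (pyFactorial d)) ((K * prodFact v : Nat) : Int)
      = (K : Int) := by
  induction v generalizing K with
  | nil => simp [prodFact]
  | cons d v ih =>
    simp only [List.map_cons, List.foldl_cons]
    have h1 : pyFactorial (d : Int) = ((d.factorial : Nat) : Int) := by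
      simp [pyFactorial]
    rw [h1, PySem.Int.floordiv_natCast]
    have h2 : K * prodFact (d :: v) / d.factorial = K * prodFact v := by
      have : K * prodFact (d :: v) = (K * prodFact v) * d.factorial := by
        simp only [prodFact, List.map_cons, List.prod_cons]; ring
      rw [this, Nat.mul_div_left _ (Nat.factorial_pos d)]
    rw [h2, ih]

lemma tmp_eq (v : List Nat) :
    (v.map (Nat.cast : Nat → Int)).foldl
      (fun t d => PySem.Int.floordiv t (pyFactorial d))
      (pyFactorial ((v.map (Nat.cast : Nat → Int)).sum)) = (mult v : Int) := by
  have h1 : (v.map (Nat.cast : Nat → Int)).sum = (v.sum : Int) := (Nat.cast_list_sum v).symm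
  have h2 : pyFactorial ((v.sum : Nat) : Int) = ((v.sum.factorial : Nat) : Int) := by
    unfold pyFactorial; rw [Int.toNat_natCast]
  rw [h1, h2, fact_eq v]
  exact foldl_div_fact v (mult v)

lemma decode_zero_mult (fs : List Nat) : mult (decodeN fs 0) = 1 := by
  induction fs with
  | nil => simp [decodeN, mult]
  | cons f fs ih => simpa [decodeN, mult] using ih

lemma prodN_pos (fs : List Nat) : 1 ≤ prodN fs := by
  induction fs with
  | nil => simp [prodN]
  | cons f fs ih => exact Nat.mul_pos (Nat.succ_pos f) ih

lemma foldl_mul_cast (fs : List Nat) (a : Nat) :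
    fs.foldl (fun (p : Int) (f : Nat) => p * ((f : Int) + 1)) (a : Int) = ((a * prodN fs : Nat) : Int) := by
  induction fs generalizing a with
  | nil => simp [prodN]
  | cons f fs ih =>
    simp only [List.foldl_cons]
    have : (a : Int) * ((f : Int) + 1) = ((a * (f + 1) : Nat) : Int) := by push_cast; ring
    rw [this, ih]
    congr 1
    show a * (f + 1) * prodN fs = a * prodN (f :: fs)
    simp only [prodN]; ring

lemma decode_fold (fs : List Nat) (n : Nat) (acc : List Int) :
    fs.foldl
      (fun (st : List Int × Int) (f : Nat) =>
        (st.1 ++ [PySem.Int.mod st.2 ((f : Int) + 1)], PySem.Int.floordiv st.2 ((f : Int) + 1)))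
      (acc, (n : Int))
      = (acc ++ (decodeN fs n).map (Nat.cast : Nat → Int), ((n / prodN fs : Nat) : Int)) := by
  induction fs generalizing n acc with
  | nil => simp [decodeN, prodN]
  | cons f fs ih =>
    simp only [List.foldl_cons]
    have hc : ((f : Int) + 1) = ((f + 1 : Nat) : Int) := by push_cast; ring
    rw [hc, PySem.Int.mod_natCast, PySem.Int.floordiv_natCast, ih]
    show _ = (acc ++ (decodeN (f :: fs) n).map _, ((n / prodN (f :: fs) : Nat) : Int))
    simp only [decodeN, prodN, List.map_cons, List.append_assoc, List.cons_append,
      List.nil_append, Nat.div_div_eq_div_mul]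

lemma choose_tri (n i j : Nat) : n.choose i * (n - i).choose j = n.choose j * (n - j).choose i := by
  have h1 := Nat.choose_mul (n := n) (k := i + j) (s := i) (Nat.le_add_right i j)
  have h2 := Nat.choose_mul (n := n) (k := i + j) (s := j) (Nat.le_add_left j i)
  have h3 : (i + j).choose i = (i + j).choose j := Nat.choose_symm_add
  simp only [Nat.add_sub_cancel_left, Nat.add_sub_cancel] at h1 h2
  calc n.choose i * (n - i).choose j = n.choose (i + j) * (i + j).choose i := h1.symm
    _ = n.choose (i + j) * (i + j).choose j := by rw [h3]
    _ = n.choose j * (n - j).choose i := h2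

lemma divmod_block_sum (b P : Nat) (g : Nat → Nat → Nat) (hb : 0 < b) :
    ((List.range (b * P)).map (fun n => g (n % b) (n / b))).sum
      = ((List.range b).map (fun j => ((List.range P).map (g j)).sum)).sum := by
  induction P with
  | zero => simp
  | succ P ih =>
    have hr : b * (P + 1) = b * P + b := by ring
    rw [hr, List.range_add, List.map_append, List.sum_append, ih, List.map_map]
    have hblock : ((List.range b).map ((fun n => g (n % b) (n / b)) ∘ fun x => b * P + x)).sum
        = ((List.range b).map (fun j => g j P)).sum := by
      apply congrArg
      apply List.map_congr_left
      intro r hr'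
      have hrb : r < b := List.mem_range.mp hr'
      have h1 : (b * P + r) / b = P := by
        rw [Nat.mul_add_div hb]; simp [Nat.div_eq_of_lt hrb]
      have h2 : (b * P + r) % b = r := by
        rw [Nat.mul_add_mod]; exact Nat.mod_eq_of_lt hrb
      simp only [Function.comp]
      rw [h1, h2]
    rw [hblock, ← List.sum_map_add]
    apply congrArg; apply List.map_congr_left; intro j _
    rw [List.range_succ, List.map_append, List.sum_append]; simp

lemma bij_sum (fs : List Nat) (H : List Nat → Nat) :
    ((List.range (prodN fs)).map (fun n => H (decodeN fs n))).sum = ((vecs fs).map H).sum := by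
  induction fs generalizing H with
  | nil => simp [prodN, vecs, decodeN]
  | cons f fs ih =>
    have hb : 0 < f + 1 := Nat.succ_pos f
    calc ((List.range (prodN (f :: fs))).map (fun n => H (decodeN (f :: fs) n))).sum
        = ((List.range ((f + 1) * prodN fs)).map
            (fun n => H (n % (f + 1) :: decodeN fs (n / (f + 1))))).sum := by
          simp only [prodN, decodeN]
      _ = ((List.range (f + 1)).map (fun j =>
            ((List.range (prodN fs)).map (fun q => H (j :: decodeN fs q))).sum)).sum := by
          exact divmod_block_sum (f + 1) (prodN fs) (fun j q => H (j :: decodeN fs q)) hb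
      _ = ((List.range (f + 1)).map (fun j => (((vecs fs).map (j :: ·)).map H).sum)).sum := by
          apply congrArg; apply List.map_congr_left; intro j _
          rw [ih (fun v => H (j :: v))]
          rw [List.map_map]; rfl
      _ = ((vecs (f :: fs)).map H).sum := by
          simp only [vecs, List.flatMap_def, List.map_flatten, List.sum_flatten,
            List.map_map]
          apply congrArg; apply List.map_congr_left; intro j _
          simp [Function.comp, List.map_map]

lemma aMain_eq (fs : List Nat) :
    aMain (fs.map (Nat.cast : Nat → Int)) = (totalT fs : Int) - 1 := by
  unfold aMain
  simp only [List.foldl_map]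
  have hprod := foldl_mul_cast fs 1
  rw [Nat.cast_one, one_mul] at hprod
  rw [hprod, PySem.List.pyRange_one]
  have htn : ((prodN fs : Int) - 1).toNat = prodN fs - 1 := by omega
  rw [htn, List.foldl_map]
  have hcast : ∀ k : Nat, (1 : Int) + (k : Int) = ((1 + k : Nat) : Int) := by
    intro k; push_cast; ring
  simp only [hcast, decode_fold, List.nil_append, tmp_eq]
  rw [PySem.List.foldl_add (List.range (prodN fs - 1))
    (fun k => ((mult (decodeN fs (1 + k)) : Nat) : Int)) 0, zero_add]
  have hmm : (List.range (prodN fs - 1)).map (fun k => ((mult (decodeN fs (1 + k)) : Nat) : Int))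
      = ((List.range (prodN fs - 1)).map (fun k => mult (decodeN fs (1 + k)))).map
          (Nat.cast : Nat → Int) := by
    rw [List.map_map]; rfl
  rw [hmm, ← Nat.cast_list_sum]
  have hT : totalT fs
      = 1 + ((List.range (prodN fs - 1)).map (fun k => mult (decodeN fs (1 + k)))).sum := by
    have h1 : totalT fs = ((List.range (prodN fs)).map (fun n => mult (decodeN fs n))).sum :=
      (bij_sum fs mult).symm
    have h2 : prodN fs = (prodN fs - 1) + 1 := by
      have := prodN_pos fs; omega
    rw [h1, h2, List.range_succ_eq_map, List.map_cons, List.sum_cons, decode_zero_mult,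
      List.map_map]
    simp only [Nat.add_sub_cancel]
    congr 1
    refine congrArg (List.sum : List Nat → Nat) ?_
    apply List.map_congr_left
    intro k _
    show mult (decodeN fs (Nat.succ k)) = mult (decodeN fs (1 + k))
    have hsk : Nat.succ k = 1 + k := by omega
    rw [hsk]
  rw [hT]
  push_cast
  ring

lemma vec_sum_le (fs : List Nat) (v : List Nat) (hv : v ∈ vecs fs) : v.sum ≤ fs.sum := by
  induction fs generalizing v with
  | nil => simp [vecs] at hv; simp [hv]
  | cons f fs ih =>
    simp only [vecs, List.mem_flatMap, List.mem_map, List.mem_range] at hv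
    obtain ⟨j, hj, w, hw, rfl⟩ := hv
    have := ih w hw
    simp only [List.sum_cons, List.sum_cons]
    omega

lemma coeff_zero_of_gt (fs : List Nat) (n : Nat) (h : fs.sum < n) : coeff fs n = 0 := by
  induction fs generalizing n with
  | nil => simp at h; simp [coeff]; omega
  | cons f fs ih =>
    simp only [coeff]
    have : ∀ j ∈ List.range (min f n + 1), n.choose j * coeff fs (n - j) = 0 := by
      intro j hj
      have hj' : j ≤ min f n := by simpa [Nat.lt_succ_iff] using List.mem_range.mp hj
      have : fs.sum < n - j := by
        simp only [List.sum_cons] at h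
        omega
      rw [ih _ this, Nat.mul_zero]
    rw [List.map_congr_left this]
    simp

lemma trunc_sum (f n : Nat) (F : Nat → Nat) :
    ((List.range (f + 1)).map (fun j => if j ≤ n then F j else 0)).sum
      = ((List.range (min f n + 1)).map F).sum := by
  by_cases hfn : f ≤ n
  · rw [Nat.min_eq_left hfn]
    refine congrArg (List.sum : List Nat → Nat) ?_
    apply List.map_congr_left
    intro j hj
    have : j ≤ n := by
      have := List.mem_range.mp hj; omega
    simp [this]
  · rw [not_le] at hfn
    rw [Nat.min_eq_right (by omega : n ≤ f)]
    have hsplit : f + 1 = (n + 1) + (f - n) := by omega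
    rw [hsplit, List.range_add, List.map_append, List.sum_append]
    have h1 : ((List.range (n + 1)).map (fun j => if j ≤ n then F j else 0)).sum
        = ((List.range (n + 1)).map F).sum := by
      refine congrArg (List.sum : List Nat → Nat) ?_
      apply List.map_congr_left
      intro j hj
      have : j ≤ n := by have := List.mem_range.mp hj; omega
      simp [this]
    have h2 : (((List.range (f - n)).map (fun x => n + 1 + x)).map
        (fun j => if j ≤ n then F j else 0)).sum = 0 := by
      rw [List.map_map]
      have : ∀ x ∈ List.range (f - n), ((fun j => if j ≤ n then F j else 0) ∘ (fun x => n + 1 + x)) x = 0 := by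
        intro x _
        simp only [Function.comp]
        have : ¬ (n + 1 + x ≤ n) := by omega
        simp [this]
      rw [List.map_congr_left this]
      simp
    rw [h1, h2, Nat.add_zero]

lemma coeff_eq (fs : List Nat) (n : Nat) :
    ((vecs fs).map (fun v => if v.sum = n then mult v else 0)).sum = coeff fs n := by
  induction fs generalizing n with
  | nil => simp [vecs, coeff, mult, eq_comm]
  | cons f fs ih =>
    simp only [vecs, List.flatMap_def, List.map_flatten, List.sum_flatten, List.map_map]
    have hj : ∀ j ∈ List.range (f + 1),
        (List.sum ∘ List.map (fun v => if v.sum = n then mult v else 0) ∘ fun j => List.map (fun x => j :: x) (vecs fs)) j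
          = if j ≤ n then n.choose j * coeff fs (n - j) else 0 := by
      intro j _
      simp only [Function.comp, List.map_map]
      have hterm : ∀ v ∈ vecs fs,
          ((fun v => if v.sum = n then mult v else 0) ∘ fun x => j :: x) v
            = (if j ≤ n then n.choose j else 0) * (if v.sum = n - j then mult v else 0) := by
        intro v _
        simp only [Function.comp, List.sum_cons, mult]
        by_cases h1 : j + v.sum = n
        · have h2 : j ≤ n := by omega
          have h3 : v.sum = n - j := by omega
          simp [h2, h3]
        · by_cases h2 : j ≤ n
          · by_cases h3 : v.sum = n - j
            · exfalso; omega
            · simp [h1, h3]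
          · simp [h1, h2]
      rw [List.map_congr_left hterm]
      rw [List.sum_map_mul_left]
      by_cases h2 : j ≤ n
      · simp only [h2, if_true, ih (n - j)]
      · simp [h2]
    rw [List.map_congr_left hj, trunc_sum]
    rfl

lemma reprB_length (gs : List Nat) : (reprB gs).length = gs.sum + 1 := by
  simp [reprB]

lemma stepB_eq (gs : List Nat) (f : Nat) :
    (List.range ((reprB gs).length + f)).map (fun n =>
        (List.range (min f n + 1)).foldl
          (fun s j => if n - j < (reprB gs).length then
              s + (n.choose j : Int) * (reprB gs).getD (n - j) 0 else s)
          0)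
      = reprB (f :: gs) := by
  rw [reprB_length]
  have hrange : gs.sum + 1 + f = (f :: gs).sum + 1 := by simp [List.sum_cons]; omega
  rw [hrange]
  show _ = (List.range ((f :: gs).sum + 1)).map _
  apply List.map_congr_left
  intro n _
  have hfun : (fun (s : Int) (j : Nat) => if n - j < gs.sum + 1 then
        s + (n.choose j : Int) * (reprB gs).getD (n - j) 0 else s)
      = (fun (s : Int) (j : Nat) => s + (if n - j < gs.sum + 1 then
        (n.choose j : Int) * (reprB gs).getD (n - j) 0 else 0)) := by
    funext s j; split <;> simp
  rw [hfun, PySem.List.foldl_add, zero_add]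
  have hterm : ∀ j ∈ List.range (min f n + 1),
      (if n - j < gs.sum + 1 then (n.choose j : Int) * (reprB gs).getD (n - j) 0 else 0)
        = ((n.choose j * coeff gs (n - j) : Nat) : Int) := by
    intro j _
    by_cases hle : n - j < gs.sum + 1
    · rw [if_pos hle]
      unfold reprB
      rw [PySem.List.getD_map_range _ _ _ _ hle]
      push_cast; ring
    · rw [if_neg hle]
      have : coeff gs (n - j) = 0 := coeff_zero_of_gt gs (n - j) (by omega)
      simp [this]
  rw [List.map_congr_left hterm]
  have hcc : (List.range (min f n + 1)).map (fun j => ((n.choose j * coeff gs (n - j) : Nat) : Int))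
      = ((List.range (min f n + 1)).map (fun j => n.choose j * coeff gs (n - j))).map
          (Nat.cast : Nat → Int) := by
    rw [List.map_map]; rfl
  rw [hcc, ← Nat.cast_list_sum]
  rfl

lemma foldB_eq (fs gs : List Nat) :
    fs.foldl
      (fun (dp : List Int) (f : Nat) =>
        (List.range (dp.length + f)).map (fun n =>
          (List.range (min f n + 1)).foldl
            (fun s j => if n - j < dp.length then s + (n.choose j : Int) * dp.getD (n - j) 0 else s)
            0))
      (reprB gs)
      = reprB (fs.reverse ++ gs) := by
  induction fs generalizing gs with
  | nil => simp
  | cons f fs ih =>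
    rw [List.foldl_cons, stepB_eq, ih]
    congr 1
    simp

lemma list_sum_swap {α : Type} (m : Nat) (l : List α) (g : α → Nat → Nat) :
    ((List.range m).map (fun n => (l.map (fun v => g v n)).sum)).sum
      = (l.map (fun v => ((List.range m).map (g v)).sum)).sum := by
  induction l with
  | nil => simp
  | cons x l ih =>
    simp only [List.map_cons, List.sum_cons, ← ih, ← List.sum_map_add]

lemma sum_coeff_eq_total (fs : List Nat) :
    ((List.range (fs.sum + 1)).map (coeff fs)).sum = totalT fs := by
  have h1 : (List.range (fs.sum + 1)).map (coeff fs)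
      = (List.range (fs.sum + 1)).map (fun n =>
          ((vecs fs).map (fun v => if v.sum = n then mult v else 0)).sum) := by
    apply List.map_congr_left
    intro n _
    exact (coeff_eq fs n).symm
  rw [h1, list_sum_swap]
  unfold totalT
  refine congrArg (List.sum : List Nat → Nat) ?_
  apply List.map_congr_left
  intro v hv
  have hle : v.sum < fs.sum + 1 := Nat.lt_succ_of_le (vec_sum_le fs v hv)
  rw [lrange_sum]
  have hsym : ∀ n : Nat, (if v.sum = n then mult v else 0) = (if n = v.sum then mult v else 0) := by
    intro n
    rcases eq_or_ne v.sum n with h | h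
    · simp [h]
    · simp [h, Ne.symm h]
  simp only [hsym]
  rw [Finset.sum_ite_eq' (Finset.range (fs.sum + 1)) v.sum (fun _ => mult v)]
  simp [Finset.mem_range, hle]

lemma coeff_cons_finset (a : Nat) (t : List Nat) (n : Nat) :
    coeff (a :: t) n = ∑ i ∈ Finset.range (n + 1),
      (if i ≤ a then n.choose i * coeff t (n - i) else 0) := by
  show ((List.range (min a n + 1)).map (fun j => n.choose j * coeff t (n - j))).sum = _
  rw [lrange_sum]
  calc ∑ i ∈ Finset.range (min a n + 1), n.choose i * coeff t (n - i)
      = ∑ i ∈ Finset.range (min a n + 1), (if i ≤ a then n.choose i * coeff t (n - i) else 0) := by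
        apply Finset.sum_congr rfl
        intro i hi
        have : i ≤ a := by have := Finset.mem_range.mp hi; omega
        simp [this]
    _ = ∑ i ∈ Finset.range (n + 1), (if i ≤ a then n.choose i * coeff t (n - i) else 0) := by
        apply Finset.sum_subset
        · intro x hx
          simp only [Finset.mem_range] at hx ⊢
          omega
        intro i hi hni
        have h1 : i < n + 1 := Finset.mem_range.mp hi
        have h2 : min a n + 1 ≤ i := by
          by_contra hc
          exact hni (Finset.mem_range.mpr (by omega))
        have : ¬ i ≤ a := by omega
        simp [this]

lemma coeff_swap (a b : Nat) (t : List Nat) (n : Nat) :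
    coeff (a :: b :: t) n = coeff (b :: a :: t) n := by
  have expand : ∀ x y : Nat, coeff (x :: y :: t) n
      = ∑ i ∈ Finset.range (n + 1), ∑ j ∈ Finset.range (n + 1),
          (if i ≤ x then n.choose i * (if j ≤ y then (n - i).choose j * coeff t (n - i - j) else 0) else 0) := by
    intro x y
    rw [coeff_cons_finset]
    apply Finset.sum_congr rfl
    intro i _
    by_cases hix : i ≤ x
    · simp only [if_pos hix]
      rw [coeff_cons_finset, Finset.mul_sum]
      apply Finset.sum_subset
      · intro x hx
        simp only [Finset.mem_range] at hx ⊢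
        omega
      intro j hj hnj
      have h1 : j < n + 1 := Finset.mem_range.mp hj
      have h2 : n - i + 1 ≤ j := by
        by_contra hc
        exact hnj (Finset.mem_range.mpr (by omega))
      have hz : (n - i).choose j = 0 := Nat.choose_eq_zero_of_lt (by omega)
      by_cases hjy : j ≤ y <;> simp [hjy, hz]
    · simp only [if_neg hix]
      rw [Finset.sum_const_zero]
  rw [expand a b, expand b a, Finset.sum_comm]
  apply Finset.sum_congr rfl
  intro j _
  apply Finset.sum_congr rfl
  intro i _
  have hsub : n - i - j = n - j - i := by omega
  rw [hsub]
  by_cases hia : i ≤ a <;> by_cases hjb : j ≤ b <;> simp [hia, hjb]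
  rw [← Nat.mul_assoc, ← Nat.mul_assoc, choose_tri]

lemma coeff_perm {fs gs : List Nat} (h : fs.Perm gs) : ∀ n, coeff fs n = coeff gs n := by
  induction h with
  | nil => intro n; rfl
  | cons x _ ih =>
    intro n
    simp only [coeff]
    refine congrArg (List.sum : List Nat → Nat) ?_
    apply List.map_congr_left
    intro j _
    rw [ih (n - j)]
  | swap x y l => intro n; exact coeff_swap y x l n
  | trans _ _ ih1 ih2 => intro n; rw [ih1 n, ih2 n]

lemma bMain_eq (fs : List Nat) :
    bMain (fs.map (Nat.cast : Nat → Int)) = (totalT fs : Int) - 1 := by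
  unfold bMain
  simp only [List.foldl_map, Int.toNat_natCast]
  have h0 : ([1] : List Int) = reprB [] := by
    simp [reprB, coeff]
  rw [h0, foldB_eq fs [], List.append_nil]
  have hs : (reprB fs.reverse).sum = ((totalT fs : Nat) : Int) := by
    unfold reprB
    rw [show (List.range (fs.reverse.sum + 1)).map (fun n => ((coeff fs.reverse n : Nat) : Int))
        = ((List.range (fs.reverse.sum + 1)).map (coeff fs.reverse)).map (Nat.cast : Nat → Int) from by
      rw [List.map_map]; rfl]
    rw [← Nat.cast_list_sum]
    have hsum : fs.reverse.sum = fs.sum := List.sum_reverse fs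
    have hcal : ((List.range (fs.reverse.sum + 1)).map (coeff fs.reverse)).sum
        = ((List.range (fs.sum + 1)).map (coeff fs)).sum := by
      rw [hsum]
      refine congrArg (List.sum : List Nat → Nat) ?_
      apply List.map_congr_left
      intro n _
      exact coeff_perm (List.reverse_perm fs) n
    rw [hcal, sum_coeff_eq_total]
  rw [hs]

lemma counter_values (cs : List Char) :
    (PySem.Dict.counter cs).values
      = ((PySem.Set.ofList cs).map (fun k => cs.count k)).map (Nat.cast : Nat → Int) := by
  have h : (PySem.Dict.counter cs).values = ((PySem.Dict.counter cs).items).map (·.2) := rfl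
  rw [h, PySem.Dict.items_counter, List.map_map, List.map_map]
  rfl

-- ===== VERDICT (by name: the statement is the Claim_ definition above) =====
theorem numTilePossibilities_spec : Claim_equal_numTilePossibilities := by
  intro tiles _
  unfold Spec_numTilePossibilities numTilePossibilities numTilePossibilities_alt
  rw [counter_values, aMain_eq, bMain_eq]
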